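-- pv_equiv track=rewrite | github.com/my-ijet/egisso_utils | svod.py | report_mera_name_of_uuid
-- ===== SOURCE A (Python) =====
-- name_for_compose_uuid = {
--     'Возмещение расходов по оплате жилого помещения':
--         [
--         'd90b5df8-54b2-4a88-9302-fe35c3a08f44',
--         'cef59820-c062-489b-a43e-7eca1089a5be',
--         '17f046ea-a5e5-49b3-a75a-b13f832bea2b',
--         '6f712658-3040-4402-82c8-a71eddf15513',
--         'ccf49282-8cb1-4fd1-93a3-4acff183bcd8',
--         'ea4ca0d2-65eb-4b9b-980a-7a804ab40731',
--         '5c64e81d-db3b-4f00-8c22-681e48d1d329',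
--         '34a0ac95-a8db-4a94-bc27-8e2eff70db25',
--         '7c48ccc0-d936-4043-83af-1fd039ca1049',
--         '4630ba88-0367-4c64-9bc9-4b721055b502',
--         '7c89a01d-b4ce-4b10-bb01-44e9abde230d'],
--     'Компенсация части платы взимаемой с родителей':
--         [
--             'dbbbeafb-590b-4bdf-97a2-569a8afe6d7f'
--         ],
--     'Полное или частичное освобождение от родительской платы за присмотр и уход за ребенком, осваивающим образовательную программу дошкольного образования в организации, осуществляющей образовательную деятельность (содержание ребенка в дошкольной образовательной организации)':
--         [
--             '4b120a4b-b68c-436d-a24d-fc62683e46bb'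
--         ],
--     'Предоставление бесплатного питания':
--         [
--             'df7a014d-a8bc-411d-b103-ad105d94f24e'
--         ],
--     'Выплата на содержание детей-сирот и детей, оставшихся без попечения родителей в семье опекуна, приемной семье':
--         [
--             '324d6e47-f1f0-478e-83ee-aeb40c3817dd',
--             '36c2a946-0bb7-4b1a-a2bf-d947b6f1019c'
--         ]
-- }
--
-- def report_mera_name_of_uuid(meras_raw_dict):
--     meras_dict_compose = {}
--     meras_dict_compose.setdefault('',[0,0])
--     del meras_dict_compose['']
--
--     for mera_uuid in meras_raw_dict:
--         for compose_key in name_for_compose_uuid: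
--             if mera_uuid in name_for_compose_uuid[compose_key]:
--                 if compose_key not in meras_dict_compose:
--                     meras_dict_compose[compose_key] = [0,0]
--                     meras_dict_compose[compose_key][0] = meras_raw_dict[mera_uuid][0]
--                     meras_dict_compose[compose_key][1] = meras_raw_dict[mera_uuid][1]
--                 else:
--                     meras_dict_compose[compose_key][0] += meras_raw_dict[mera_uuid][0]
--                     meras_dict_compose[compose_key][1] += meras_raw_dict[mera_uuid][1]
--     return meras_dict_compose
-- ===== SOURCE B (Python) =====
-- name_for_compose_uuid = {
--     'Возмещение расходов по оплате жилого помещения':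
--         [
--         'd90b5df8-54b2-4a88-9302-fe35c3a08f44',
--         'cef59820-c062-489b-a43e-7eca1089a5be',
--         '17f046ea-a5e5-49b3-a75a-b13f832bea2b',
--         '6f712658-3040-4402-82c8-a71eddf15513',
--         'ccf49282-8cb1-4fd1-93a3-4acff183bcd8',
--         'ea4ca0d2-65eb-4b9b-980a-7a804ab40731',
--         '5c64e81d-db3b-4f00-8c22-681e48d1d329',
--         '34a0ac95-a8db-4a94-bc27-8e2eff70db25',
--         '7c48ccc0-d936-4043-83af-1fd039ca1049',
--         '4630ba88-0367-4c64-9bc9-4b721055b502',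
--         '7c89a01d-b4ce-4b10-bb01-44e9abde230d'],
--     'Компенсация части платы взимаемой с родителей':
--         [
--             'dbbbeafb-590b-4bdf-97a2-569a8afe6d7f'
--         ],
--     'Полное или частичное освобождение от родительской платы за присмотр и уход за ребенком, осваивающим образовательную программу дошкольного образования в организации, осуществляющей образовательную деятельность (содержание ребенка в дошкольной образовательной организации)':
--         [
--             '4b120a4b-b68c-436d-a24d-fc62683e46bb'
--         ],
--     'Предоставление бесплатного питания':
--         [
--             'df7a014d-a8bc-411d-b103-ad105d94f24e'
--         ],
--     'Выплата на содержание детей-сирот и детей, оставшихся без попечения родителей в семье опекуна, приемной семье':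
--         [
--             '324d6e47-f1f0-478e-83ee-aeb40c3817dd',
--             '36c2a946-0bb7-4b1a-a2bf-d947b6f1019c'
--         ]
-- }
--
-- # reverse index built once: uuid -> compose category name
-- _key_of_uuid = {u: k for k, us in name_for_compose_uuid.items() for u in us}
--
-- def report_mera_name_of_uuid(meras_raw_dict):
--     out = {}
--     for mera_uuid, counts in meras_raw_dict.items():
--         key = _key_of_uuid.get(mera_uuid)
--         if key is None:
--             continue
--         slot = out.setdefault(key, [0, 0])
--         slot[0] += counts[0]
--         slot[1] += counts[1]
--     return out
-- ===== Notes on version B (the rewrite author's own statement) =====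
-- stated objective: faster
-- what changed: Replaces A's nested loop (for each input uuid, scan all five categories' uuid lists and branch on first-time vs later) with a reverse index uuid->category built once from the constant table, then a single setdefault-and-add pass over the items; the per-item category scan disappears behind one hash lookup.
import Mathlib
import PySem

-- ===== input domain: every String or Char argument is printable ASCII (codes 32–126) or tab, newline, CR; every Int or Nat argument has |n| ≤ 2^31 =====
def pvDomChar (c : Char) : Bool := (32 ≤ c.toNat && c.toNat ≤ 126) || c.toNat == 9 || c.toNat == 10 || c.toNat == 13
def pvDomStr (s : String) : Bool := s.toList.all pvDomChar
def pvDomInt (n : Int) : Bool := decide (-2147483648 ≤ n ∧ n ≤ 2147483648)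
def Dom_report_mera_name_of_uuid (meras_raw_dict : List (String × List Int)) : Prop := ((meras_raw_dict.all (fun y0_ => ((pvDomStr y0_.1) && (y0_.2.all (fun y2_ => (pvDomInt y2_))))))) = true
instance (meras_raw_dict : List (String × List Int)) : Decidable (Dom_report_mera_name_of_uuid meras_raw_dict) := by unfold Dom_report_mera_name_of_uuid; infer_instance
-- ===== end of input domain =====

-- B replaces A's nested category scan with a reverse uuid->category index built once
-- from the constant table and a single setdefault-and-add pass over the items (simpler).


-- ===== PORT A =====
-- the module constant name_for_compose_uuid, in source order
def pvTable : List (String × List String) := [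
  ("Возмещение расходов по оплате жилого помещения",
    ["d90b5df8-54b2-4a88-9302-fe35c3a08f44",
     "cef59820-c062-489b-a43e-7eca1089a5be",
     "17f046ea-a5e5-49b3-a75a-b13f832bea2b",
     "6f712658-3040-4402-82c8-a71eddf15513",
     "ccf49282-8cb1-4fd1-93a3-4acff183bcd8",
     "ea4ca0d2-65eb-4b9b-980a-7a804ab40731",
     "5c64e81d-db3b-4f00-8c22-681e48d1d329",
     "34a0ac95-a8db-4a94-bc27-8e2eff70db25",
     "7c48ccc0-d936-4043-83af-1fd039ca1049",
     "4630ba88-0367-4c64-9bc9-4b721055b502",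
     "7c89a01d-b4ce-4b10-bb01-44e9abde230d"]),
  ("Компенсация части платы взимаемой с родителей",
    ["dbbbeafb-590b-4bdf-97a2-569a8afe6d7f"]),
  ("Полное или частичное освобождение от родительской платы за присмотр и уход за ребенком, осваивающим образовательную программу дошкольного образования в организации, осуществляющей образовательную деятельность (содержание ребенка в дошкольной образовательной организации)",
    ["4b120a4b-b68c-436d-a24d-fc62683e46bb"]),
  ("Предоставление бесплатного питания",
    ["df7a014d-a8bc-411d-b103-ad105d94f24e"]),
  ("Выплата на содержание детей-сирот и детей, оставшихся без попечения родителей в семье опекуна, приемной семье",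
    ["324d6e47-f1f0-478e-83ee-aeb40c3817dd",
     "36c2a946-0bb7-4b1a-a2bf-d947b6f1019c"])]

def report_mera_name_of_uuid (meras_raw_dict : List (String × List Int)) : List (String × List Int) :=
  let m : PySem.Dict String (List Int) := PySem.Dict.mk meras_raw_dict
  -- meras_dict_compose = {}; setdefault('',[0,0]); del ['']
  let init : PySem.Dict String (List Int) :=
    PySem.Dict.erase (PySem.Dict.setdefault PySem.Dict.empty "" [0, 0]) ""
  ((PySem.Dict.keys m).foldl (fun acc mera_uuid =>
    pvTable.foldl (fun acc2 entry =>
      if entry.2.contains mera_uuid then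
        let v := PySem.Dict.getD m mera_uuid []
        if PySem.Dict.contains acc2 entry.1 = false then
          PySem.Dict.insert acc2 entry.1
            [PySem.List.pyGetD v 0 0, PySem.List.pyGetD v 1 0]
        else
          PySem.Dict.insert acc2 entry.1
            [PySem.List.pyGetD (PySem.Dict.getD acc2 entry.1 []) 0 0 + PySem.List.pyGetD v 0 0,
             PySem.List.pyGetD (PySem.Dict.getD acc2 entry.1 []) 1 0 + PySem.List.pyGetD v 1 0]
      else acc2) acc) init).items

-- ===== PORT B =====
-- _key_of_uuid = {u: k for k, us in name_for_compose_uuid.items() for u in us}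
def pvUuidIndex : PySem.Dict String String :=
  PySem.Dict.mk (pvTable.flatMap (fun entry => entry.2.map (fun u => (u, entry.1))))

def report_mera_name_of_uuid_alt (meras_raw_dict : List (String × List Int)) : List (String × List Int) :=
  (meras_raw_dict.foldl (fun out p =>
    match PySem.Dict.get? pvUuidIndex p.1 with
    | none => out
    | some key =>
      -- slot = out.setdefault(key, [0,0]); slot[0] += counts[0]; slot[1] += counts[1]
      match PySem.Dict.get? out key with
      | none => PySem.Dict.insert out key
          [0 + PySem.List.pyGetD p.2 0 0, 0 + PySem.List.pyGetD p.2 1 0]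
      | some slot => PySem.Dict.insert out key
          [PySem.List.pyGetD slot 0 0 + PySem.List.pyGetD p.2 0 0,
           PySem.List.pyGetD slot 1 0 + PySem.List.pyGetD p.2 1 0])
    (PySem.Dict.empty : PySem.Dict String (List Int))).items

-- ===== PRECONDITION & SPEC =====
-- the 16 UUIDs appearing in the constant table (used only to state Pre_)
def pvKnownUuids : List String :=
  ["d90b5df8-54b2-4a88-9302-fe35c3a08f44", "cef59820-c062-489b-a43e-7eca1089a5be",
   "17f046ea-a5e5-49b3-a75a-b13f832bea2b", "6f712658-3040-4402-82c8-a71eddf15513",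
   "ccf49282-8cb1-4fd1-93a3-4acff183bcd8", "ea4ca0d2-65eb-4b9b-980a-7a804ab40731",
   "5c64e81d-db3b-4f00-8c22-681e48d1d329", "34a0ac95-a8db-4a94-bc27-8e2eff70db25",
   "7c48ccc0-d936-4043-83af-1fd039ca1049", "4630ba88-0367-4c64-9bc9-4b721055b502",
   "7c89a01d-b4ce-4b10-bb01-44e9abde230d", "dbbbeafb-590b-4bdf-97a2-569a8afe6d7f",
   "4b120a4b-b68c-436d-a24d-fc62683e46bb", "df7a014d-a8bc-411d-b103-ad105d94f24e",
   "324d6e47-f1f0-478e-83ee-aeb40c3817dd", "36c2a946-0bb7-4b1a-a2bf-d947b6f1019c"]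

-- Pre_ excludes (i) inputs where a table UUID key carries a value list of fewer than 2 entries,
-- on which the Python A (and B) raises IndexError, and (ii) association lists with duplicate
-- keys, which do not represent any Python dict (the argument is a dict).
def Pre_report_mera_name_of_uuid (meras_raw_dict : List (String × List Int)) : Prop :=
  (meras_raw_dict.map Prod.fst).Nodup ∧
  ∀ p ∈ meras_raw_dict, p.1 ∈ pvKnownUuids → 2 ≤ p.2.length
instance (meras_raw_dict : List (String × List Int)) : Decidable (Pre_report_mera_name_of_uuid meras_raw_dict) := by unfold Pre_report_mera_name_of_uuid; infer_instance

def pvWitness_report_mera_name_of_uuid : (List (String × List Int)) :=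
  [("dbbbeafb-590b-4bdf-97a2-569a8afe6d7f", [1, 2]), ("zz", [7])]

def Spec_report_mera_name_of_uuid (meras_raw_dict : List (String × List Int)) (out : List (String × List Int)) : Prop := out = report_mera_name_of_uuid_alt meras_raw_dict
instance (meras_raw_dict : List (String × List Int)) (out : List (String × List Int)) : Decidable (Spec_report_mera_name_of_uuid meras_raw_dict out) := by unfold Spec_report_mera_name_of_uuid; infer_instance

-- ===== CLAIM (what is proved, stated in full; the proofs are below) =====
def Claim_equal_report_mera_name_of_uuid : Prop := ∀ (meras_raw_dict : List (String × List Int)), Dom_report_mera_name_of_uuid meras_raw_dict → Pre_report_mera_name_of_uuid meras_raw_dict → Spec_report_mera_name_of_uuid meras_raw_dict (report_mera_name_of_uuid meras_raw_dict)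

-- ===== LEMMAS AND PROOFS =====

-- the common per-item update step (B's body for one matched item)
def pvStep (acc : PySem.Dict String (List Int)) (k : String) (v : List Int) :
    PySem.Dict String (List Int) :=
  match PySem.Dict.get? acc k with
  | none => PySem.Dict.insert acc k
      [0 + PySem.List.pyGetD v 0 0, 0 + PySem.List.pyGetD v 1 0]
  | some slot => PySem.Dict.insert acc k
      [PySem.List.pyGetD slot 0 0 + PySem.List.pyGetD v 0 0,
       PySem.List.pyGetD slot 1 0 + PySem.List.pyGetD v 1 0]

-- A's contains/getD branch computes the same step
theorem pvStepA_eq (acc : PySem.Dict String (List Int)) (k : String) (v : List Int) :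
    (if PySem.Dict.contains acc k = false then
       PySem.Dict.insert acc k [PySem.List.pyGetD v 0 0, PySem.List.pyGetD v 1 0]
     else
       PySem.Dict.insert acc k
         [PySem.List.pyGetD (PySem.Dict.getD acc k []) 0 0 + PySem.List.pyGetD v 0 0,
          PySem.List.pyGetD (PySem.Dict.getD acc k []) 1 0 + PySem.List.pyGetD v 1 0]) =
    pvStep acc k v := by
  cases h : PySem.Dict.get? acc k with
  | none =>
      simp [pvStep, h, PySem.Dict.contains_eq_isSome_get?]
  | some slot =>
      simp [pvStep, h, PySem.Dict.contains_eq_isSome_get?,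
            PySem.Dict.getD_eq_get?_getD]

-- first-match lookup in a block of pairs all mapping to k, then a tail
theorem pv_get?_mk_block (us : List String) (k : String) (tail : List (String × String))
    (u : String) :
    PySem.Dict.get? (PySem.Dict.mk (us.map (fun x => (x, k)) ++ tail)) u =
      (if us.contains u then some k else PySem.Dict.get? (PySem.Dict.mk tail) u) := by
  induction us with
  | nil => simp
  | cons a t ih =>
      by_cases hau : a = u
      · subst hau
        simp [PySem.Dict.get?_mk_cons]
      · simp [PySem.Dict.get?_mk_cons, hau, ih, Ne.symm hau]

-- if u occurs in no entry of T, the inner loop leaves the accumulator alone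
theorem pv_fold_untouched (u : String) (v : List Int)
    (T : List (String × List String)) (hT : ∀ e ∈ T, u ∉ e.2) :
    ∀ acc, T.foldl (fun acc2 entry =>
        if entry.2.contains u then pvStep acc2 entry.1 v else acc2) acc = acc := by
  induction T with
  | nil => intro acc; rfl
  | cons e rest ih =>
      intro acc
      have he : u ∉ e.2 := hT e (by simp)
      have : e.2.contains u = false := by
        simpa using he
      simp only [List.foldl_cons, this, Bool.false_eq_true, if_false]
      exact ih (fun e' h' => hT e' (by simp [h'])) acc

-- the inner category scan is one lookup in the flattened index followed by one step
theorem pv_inner_eq (u : String) (v : List Int) (T : List (String × List String)) :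
    T.Pairwise (fun a b => ∀ x ∈ a.2, x ∉ b.2) →
    ∀ acc, T.foldl (fun acc2 entry =>
        if entry.2.contains u then pvStep acc2 entry.1 v else acc2) acc =
      (match PySem.Dict.get?
          (PySem.Dict.mk (T.flatMap (fun entry => entry.2.map (fun x => (x, entry.1))))) u with
       | none => acc
       | some k => pvStep acc k v) := by
  induction T with
  | nil => intro _ acc; rfl
  | cons e rest ih =>
      intro hd acc
      rcases List.pairwise_cons.mp hd with ⟨hde, hdr⟩
      rw [List.foldl_cons, List.flatMap_cons]
      rw [pv_get?_mk_block]
      by_cases hu : u ∈ e.2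
      · have hc : e.2.contains u = true := by simpa using hu
        simp only [hc, if_true]
        have hrest : ∀ e' ∈ rest, u ∉ e'.2 := fun e' h' => hde e' h' u hu
        rw [pv_fold_untouched u v rest hrest]
      · have hc : e.2.contains u = false := by simpa using hu
        simp only [hc, Bool.false_eq_true, if_false]
        exact ih hdr acc

theorem pv_table_pairwise :
    pvTable.Pairwise (fun a b => ∀ x ∈ a.2, x ∉ b.2) := by decide

theorem report_mera_name_of_uuid_spec_aux (m : List (String × List Int))
    (hnd : (m.map Prod.fst).Nodup) :
    report_mera_name_of_uuid m = report_mera_name_of_uuid_alt m := by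
  unfold report_mera_name_of_uuid report_mera_name_of_uuid_alt
  simp only []
  congr 1
  have hinit : (PySem.Dict.erase (PySem.Dict.setdefault (PySem.Dict.empty) "" ([0,0] : List Int)) "")
      = (PySem.Dict.empty : PySem.Dict String (List Int)) := rfl
  rw [hinit]
  have hkeys : PySem.Dict.keys (PySem.Dict.mk m) = m.map Prod.fst := rfl
  rw [hkeys, List.foldl_map]
  apply PySem.List.foldl_congr_mem'
  intro p hp acc
  have hv : PySem.Dict.getD (PySem.Dict.mk m) p.1 [] = p.2 := by
    apply PySem.Dict.getD_of_mem_items (k := p.1) (v := p.2)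
    · exact hp
    · simpa [hkeys] using hnd
  simp only [hv, pvStepA_eq]
  rw [pv_inner_eq p.1 p.2 pvTable pv_table_pairwise acc]
  cases h : PySem.Dict.get? pvUuidIndex p.1 with
  | none => simp [pvUuidIndex] at h; rw [h]
  | some k => simp [pvUuidIndex] at h; rw [h]; rfl

-- ===== VERDICT (by name: the statement is the Claim_ definition above) =====
theorem report_mera_name_of_uuid_spec : Claim_equal_report_mera_name_of_uuid := by
  intro m _hdom hpre
  exact report_mera_name_of_uuid_spec_aux m hpre.1
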